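-- pv_equiv track=rewrite | github.com/xCocco0/portable-dram-bank-mapper | python_src/bit_operations.py | bank_from_bitmasks
-- ===== SOURCE A (Python) =====
-- def bank_from_bitmasks(addr, masks):
--     res = 0
--     for m in masks:
--         res <<= 1
--         v = addr & m
--         # The following will xor all the bits in v
--         # Adapted from https://graphics.stanford.edu/~seander/bithacks.html#CountBitsSetKernighan
--         while v:
--             v &= v - 1
--             res ^= 1
--     return res
-- ===== SOURCE B (Python) =====
-- def bank_from_bitmasks(addr, masks):
--     # Transposed (bit-plane) traversal: instead of computing the parity of each
--     # masked value separately, peel one low bit off every masked value per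
--     # round, pack those low bits into a column word (as a binary string, so the
--     # column is built in linear time), and XOR the bit-plane columns together.
--     # The XOR of all columns has, at each position, the parity of the set bits
--     # of that masked value -- the same bank index.
--     vs = [addr & m for m in masks]
--     res = 0
--     while any(vs):
--         res ^= int(''.join('1' if v & 1 else '0' for v in vs), 2)
--         vs = [v // 2 for v in vs]
--     return res
-- ===== Notes on version B (the rewrite author's own statement) =====
-- stated objective: faster
-- what changed: A computes each mask's parity separately with an inner Kernighan bit-clearing loop while growing the result one bit at a time with res <<= 1; B transposes the traversal: it peels one low bit off every masked value per round, packs those bits into a whole column word at once (binary-string parse), and XORs the bit-plane columns together, avoiding the repeated shifting of an ever-growing big integer.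
import Mathlib
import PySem

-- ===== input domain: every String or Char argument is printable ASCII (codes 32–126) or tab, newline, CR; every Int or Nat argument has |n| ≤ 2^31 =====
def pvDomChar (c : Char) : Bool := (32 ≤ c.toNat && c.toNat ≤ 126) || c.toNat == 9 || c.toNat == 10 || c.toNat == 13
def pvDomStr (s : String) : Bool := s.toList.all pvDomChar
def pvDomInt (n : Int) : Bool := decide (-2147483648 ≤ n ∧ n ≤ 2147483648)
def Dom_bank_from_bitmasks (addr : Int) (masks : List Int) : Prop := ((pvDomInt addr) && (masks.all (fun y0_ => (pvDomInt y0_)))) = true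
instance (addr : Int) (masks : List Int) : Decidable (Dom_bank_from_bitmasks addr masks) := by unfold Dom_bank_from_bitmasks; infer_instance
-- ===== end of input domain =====

-- B replaces A's per-mask parity accumulation (inner Kernighan bit-clearing loop) by a
-- transposed bit-plane traversal: peel one low bit off every masked value per round, pack
-- those bits into a column word, and XOR the columns together (objective: alternative).

-- ===== PORT A =====
-- Python's `while v:` diverges when v < 0 (v &= v-1 never reaches 0); Pre_ excludes those
-- inputs, so the guard `0 < v` is exact on every admitted input.
def pvKernLoop (v res : Int) : Int :=
  if h : 0 < v then pvKernLoop (PySem.Int.band v (v - 1)) (PySem.Int.bxor res 1) else res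
termination_by v.toNat
decreasing_by
  rw [PySem.Int.band_of_nonneg (by omega) (by omega)]
  have h1 : v.toNat &&& (v - 1).toNat ≤ (v - 1).toNat := Nat.and_le_right
  omega

def bank_from_bitmasks (addr : Int) (masks : List Int) : Int :=
  masks.foldl (fun res m => pvKernLoop (PySem.Int.band addr m) (res <<< (1 : Nat))) 0

-- ===== PORT B =====
-- hand port of int(''.join(...), 2): exact on the nonempty '0'/'1' strings B builds
def pvParseBin (cs : List Char) : Int :=
  cs.foldl (fun acc c => 2 * acc + (if c = '1' then 1 else 0)) 0

theorem pvHalfSum_le (vs : List Int) (h : ∀ v ∈ vs, 0 ≤ v) :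
    (vs.map (Int.toNat ∘ fun v => PySem.Int.floordiv v 2)).sum ≤ (vs.map Int.toNat).sum := by
  induction vs with
  | nil => simp
  | cons x t IH =>
    have hx : 0 ≤ x := h x (by simp)
    have hfd : PySem.Int.floordiv x 2 = x / 2 := PySem.Int.floordiv_eq_ediv_of_pos (by omega)
    have : (PySem.Int.floordiv x 2).toNat ≤ x.toNat := by rw [hfd]; omega
    have ht := IH (fun v hv => h v (by simp [hv]))
    simp only [List.map_cons, List.sum_cons, Function.comp] at *
    omega


theorem pvHalfSum_lt (vs : List Int) (hall : ∀ v ∈ vs, 0 ≤ v) (hex : ∃ v ∈ vs, v ≠ 0) :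
    (vs.map (Int.toNat ∘ fun v => PySem.Int.floordiv v 2)).sum < (vs.map Int.toNat).sum := by
  induction vs with
  | nil => simp at hex
  | cons x t IH =>
    have hx : 0 ≤ x := hall x (by simp)
    have hfd : PySem.Int.floordiv x 2 = x / 2 := PySem.Int.floordiv_eq_ediv_of_pos (by omega)
    have htall : ∀ v ∈ t, 0 ≤ v := fun v hv => hall v (by simp [hv])
    simp only [List.map_cons, List.sum_cons, Function.comp]
    by_cases hx0 : x = 0
    · obtain ⟨v0, hv0m, hv0⟩ := hex
      have hmem : v0 ∈ t := by
        cases List.mem_cons.1 hv0m with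
        | inl hh => exact absurd (hh.trans hx0) hv0
        | inr hh => exact hh
      have := IH htall ⟨v0, hmem, hv0⟩
      omega
    · have h1 : (PySem.Int.floordiv x 2).toNat < x.toNat := by rw [hfd]; omega
      have h2 := pvHalfSum_le t htall
      omega

-- Python's `while any(vs):` never ends once a value is negative (//2 tends to -1); those
-- inputs are outside Pre_, so the extra nonnegativity conjunct only makes the port total.
-- vs = [v // 2 for v in vs]
def pvHalve (vs : List Int) : List Int := vs.map (fun v => PySem.Int.floordiv v 2)

def pvPlaneLoop (vs : List Int) (res : Int) : Int :=
  if h : (∃ v ∈ vs, v ≠ 0) ∧ (∀ v ∈ vs, 0 ≤ v) then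
    pvPlaneLoop (pvHalve vs)
      (PySem.Int.bxor res
        (pvParseBin (vs.map (fun v => if PySem.Int.band v 1 = 1 then '1' else '0'))))
  else res
termination_by (vs.map Int.toNat).sum
decreasing_by
  unfold pvHalve
  rw [List.map_map]
  exact pvHalfSum_lt vs h.2 h.1

def bank_from_bitmasks_alt (addr : Int) (masks : List Int) : Int :=
  pvPlaneLoop (masks.map (fun m => PySem.Int.band addr m)) 0

-- ===== PRECONDITION & SPEC =====
-- A's inner loop never terminates when addr & m < 0 (addr and m both negative): Pre_ admits
-- exactly the inputs on which the Python A returns.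
def Pre_bank_from_bitmasks (addr : Int) (masks : List Int) : Prop :=
  ∀ m ∈ masks, 0 ≤ PySem.Int.band addr m
instance (addr : Int) (masks : List Int) : Decidable (Pre_bank_from_bitmasks addr masks) := by
  unfold Pre_bank_from_bitmasks; infer_instance

def pvWitness_bank_from_bitmasks : Int × List Int := (5, [3, 6])

def Spec_bank_from_bitmasks (addr : Int) (masks : List Int) (out : Int) : Prop := out = bank_from_bitmasks_alt addr masks
instance (addr : Int) (masks : List Int) (out : Int) : Decidable (Spec_bank_from_bitmasks addr masks out) := by unfold Spec_bank_from_bitmasks; infer_instance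

-- ===== CLAIM (what is proved, stated in full; the proofs are below) =====
def Claim_equal_bank_from_bitmasks : Prop := ∀ (addr : Int) (masks : List Int), Dom_bank_from_bitmasks addr masks → Pre_bank_from_bitmasks addr masks → Spec_bank_from_bitmasks addr masks (bank_from_bitmasks addr masks)

-- ===== LEMMAS AND PROOFS =====

-- parity of the popcount of a masked value, as a Nat
def pvParI (v : Int) : Nat := PySem.Int.bitCount v % 2

def pvPar (addr m : Int) : Int := ((PySem.Int.bitCount (PySem.Int.band addr m)) % 2 : Nat)

-- MSB-first bit packing with accumulator (the shape of both programs' column/Horner folds)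
def pvPackF (a : Nat) (bs : List Nat) : Nat := bs.foldl (fun r b => 2 * r + b) a

theorem pv_shift_one (r : Int) : r <<< (1 : Nat) = 2 * r := by
  simp [Int.shiftLeft_eq]; ring

theorem pv_bxor_one_invol (r : Int) : PySem.Int.bxor (PySem.Int.bxor r 1) 1 = r := by
  unfold PySem.Int.bxor
  by_cases h : 0 ≤ r
  · simp only [h, if_pos, if_true]
    have h0 : (0:Int) ≤ 1 := by omega
    simp [h0, Int.toNat_natCast, Nat.xor_xor_cancel_right, h]
  · simp only [h, if_neg, if_false]
    have h0 : (0:Int) ≤ 1 := by omega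
    have h1 : ¬ (0:Int) ≤ -((((-r - 1).toNat ^^^ (1:Int).toNat : Nat) : Int)) - 1 := by
      have : (0:Int) ≤ (((-r - 1).toNat ^^^ (1:Int).toNat : Nat) : Int) := Int.natCast_nonneg _
      omega
    simp only [h0, if_true, h1, if_false]
    have h2 : (-(-(((-r - 1).toNat ^^^ (1:Int).toNat : Nat) : Int) - 1) - 1) = (((-r - 1).toNat ^^^ (1:Int).toNat : Nat) : Int) := by omega
    rw [h2]
    simp [Nat.xor_xor_cancel_right]
    omega

theorem pv_bxor_two_mul (r p : Int) (hp : p = 0 ∨ p = 1) :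
    PySem.Int.bxor (2 * r) p = 2 * r + p := by
  rcases hp with h | h
  · simp [h, PySem.Int.bxor_zero]
  · subst h
    unfold PySem.Int.bxor
    by_cases hr : 0 ≤ r
    · have h2 : (0:Int) ≤ 2 * r := by omega
      have h0 : (0:Int) ≤ 1 := by omega
      simp only [h2, h0, if_true]
      have ht : (2 * r).toNat = 2 * r.toNat := by omega
      have h1t : ((1:Int)).toNat = 1 := rfl
      rw [ht, h1t]
      have hx : 2 * r.toNat ^^^ 1 = 2 * r.toNat + 1 := by
        have := Nat.xor_bit false r.toNat true 0
        simpa [Nat.bit, two_mul] using this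
      rw [hx]; omega
    · have h2 : ¬ (0:Int) ≤ 2 * r := by omega
      have h0 : (0:Int) ≤ 1 := by omega
      simp only [h2, h0, if_false, if_true]
      have ht : (-(2 * r) - 1).toNat = 2 * (-r - 1).toNat + 1 := by omega
      have h1t : ((1:Int)).toNat = 1 := rfl
      rw [ht, h1t]
      have hx : 2 * (-r - 1).toNat + 1 ^^^ 1 = 2 * (-r - 1).toNat := by
        have := Nat.xor_bit true (-r - 1).toNat true 0
        simpa [Nat.bit, two_mul] using this
      rw [hx]; omega

-- bitCount is unchanged by doubling (a zero bit is appended)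
theorem pv_bc_double (m : Nat) : PySem.Int.bitCount ((2 * m : Nat) : Int) = PySem.Int.bitCount (m : Nat) := by
  rcases Nat.eq_zero_or_pos m with h | h
  · simp [h]
  · rw [PySem.Int.bitCount_natCast (by omega)]
    have : 2 * m % 2 = 0 := by omega
    rw [this]
    have : 2 * m / 2 = m := by omega
    rw [this]
    omega

-- Kernighan's step clears exactly one set bit
theorem pv_bc_pred (n : Nat) (h : 0 < n) :
    PySem.Int.bitCount ((n &&& (n - 1) : Nat) : Int) + 1 = PySem.Int.bitCount (n : Nat) := by
  induction n using Nat.strong_induction_on with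
  | _ n IH =>
    rcases Nat.even_or_odd n with ⟨k, hk⟩ | ⟨k, hk⟩
    · have hk0 : 0 < k := by omega
      have hand : n &&& (n - 1) = 2 * (k &&& (k - 1)) := by
        have := Nat.land_bit false k true (k - 1)
        simp only [Nat.bit, Bool.cond_false, Bool.cond_true, Bool.false_and] at this
        have e2 : n - 1 = 2 * (k - 1) + 1 := by omega
        have e1 : n = 2 * k := by omega
        rw [e2, e1, this]
      rw [hand, pv_bc_double]
      have hrhs : PySem.Int.bitCount (n : Nat) = PySem.Int.bitCount (k : Nat) := by
        have e1 : (n : Int) = ((2 * k : Nat) : Int) := by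
          exact congrArg (fun t : Nat => (t : Int)) (by omega)
        rw [e1, pv_bc_double]
      rw [hrhs]
      exact IH k (by omega) hk0
    · have hand : n &&& (n - 1) = 2 * k := by
        have := Nat.land_bit true k false k
        simp only [Nat.bit, Bool.cond_false, Bool.cond_true, Bool.and_false] at this
        have e2 : n - 1 = 2 * k := by omega
        have e1 : n = 2 * k + 1 := by omega
        rw [e2, e1, this, Nat.and_self]
      rw [hand, pv_bc_double]
      have e1 : (n : Int) = ((2 * k + 1 : Nat) : Int) :=
        congrArg (fun t : Nat => (t : Int)) (by omega)
      rw [e1, PySem.Int.bitCount_natCast (m := 2 * k + 1) (by omega)]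
      have h1 : (2 * k + 1) % 2 = 1 := by omega
      have h2 : (2 * k + 1) / 2 = k := by omega
      rw [h1, h2]
      omega

-- the Kernighan loop xors in the parity of the popcount
theorem pv_kern_eq (v res : Int) (hv : 0 ≤ v) :
    pvKernLoop v res = PySem.Int.bxor res ((PySem.Int.bitCount v % 2 : Nat) : Int) := by
  generalize hn : v.toNat = n
  induction n using Nat.strong_induction_on generalizing v res with
  | _ n IH =>
    rw [pvKernLoop]
    by_cases h : 0 < v
    · simp only [h, dif_pos]
      have hb : PySem.Int.band v (v - 1) = ((v.toNat &&& (v - 1).toNat : Nat) : Int) :=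
        PySem.Int.band_of_nonneg (by omega) (by omega)
      have hb2 : (v - 1).toNat = v.toNat - 1 := by omega
      have hlt : (PySem.Int.band v (v - 1)).toNat < n := by
        rw [hb]
        have h1 : v.toNat &&& (v - 1).toNat ≤ (v - 1).toNat := Nat.and_le_right
        omega
      rw [IH _ hlt _ _ (by rw [hb]; exact Int.natCast_nonneg _) rfl]
      have hkern : PySem.Int.bitCount (PySem.Int.band v (v - 1)) + 1 = PySem.Int.bitCount v := by
        rw [hb, hb2]
        have hv' : (v : Int) = ((v.toNat : Nat) : Int) := by omega
        rw [hv']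
        exact pv_bc_pred v.toNat (by omega)
      set c := PySem.Int.bitCount v with hc
      have hc1 : PySem.Int.bitCount (PySem.Int.band v (v - 1)) = c - 1 := by omega
      have hcpos : 1 ≤ c := by omega
      rw [hc1]
      rcases Nat.even_or_odd c with ⟨k, hk⟩ | ⟨k, hk⟩
      · have e1 : (c - 1) % 2 = 1 := by omega
        have e2 : c % 2 = 0 := by omega
        rw [e1, e2]
        simp only [Nat.cast_one, Nat.cast_zero, PySem.Int.bxor_zero]
        exact pv_bxor_one_invol res
      · have e1 : (c - 1) % 2 = 0 := by omega
        have e2 : c % 2 = 1 := by omega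
        rw [e1, e2]
        simp [PySem.Int.bxor_zero]
    · simp only [h, dif_neg, not_false_iff]
      have hv0 : v = 0 := by omega
      subst hv0
      simp [PySem.Int.bitCount_zero, PySem.Int.bxor_zero]

-- A's loop body, on admitted masks, is the Horner step 2*res + parity
theorem pv_stepA (addr m res : Int) (h : 0 ≤ PySem.Int.band addr m) :
    pvKernLoop (PySem.Int.band addr m) (res <<< (1 : Nat)) = 2 * res + pvPar addr m := by
  rw [pv_kern_eq _ _ h, pv_shift_one]
  have hp : ((PySem.Int.bitCount (PySem.Int.band addr m) % 2 : Nat) : Int) = 0 ∨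
      ((PySem.Int.bitCount (PySem.Int.band addr m) % 2 : Nat) : Int) = 1 := by
    rcases Nat.mod_two_eq_zero_or_one (PySem.Int.bitCount (PySem.Int.band addr m)) with h' | h' <;>
      [left; right] <;> rw [h'] <;> simp
  unfold pvPar
  exact pv_bxor_two_mul res _ hp

-- xor of two packed bit-vectors, one bit at a time
theorem pv_xor_step (x y b c : Nat) (hb : b < 2) (hc : c < 2) :
    (2 * x + b) ^^^ (2 * y + c) = 2 * (x ^^^ y) + (b ^^^ c) := by
  interval_cases b <;> interval_cases c
  · simpa [Nat.bit, two_mul] using Nat.xor_bit false x false y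
  · simpa [Nat.bit, two_mul] using Nat.xor_bit false x true y
  · simpa [Nat.bit, two_mul] using Nat.xor_bit true x false y
  · simpa [Nat.bit, two_mul] using Nat.xor_bit true x true y

-- xor of packed bit-vectors is the pack of pointwise xors
theorem pv_pack_xor (vs : List Int) (f g k : Int → Nat)
    (hf : ∀ v ∈ vs, f v < 2) (hg : ∀ v ∈ vs, g v < 2)
    (hk : ∀ v ∈ vs, f v ^^^ g v = k v) (a b : Nat) :
    pvPackF a (vs.map f) ^^^ pvPackF b (vs.map g) = pvPackF (a ^^^ b) (vs.map k) := by
  induction vs generalizing a b with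
  | nil => simp [pvPackF]
  | cons x t IH =>
    have hstep : (2 * a + f x) ^^^ (2 * b + g x) = 2 * (a ^^^ b) + k x := by
      rw [← hk x (by simp)]
      exact pv_xor_step a b (f x) (g x) (hf x (by simp)) (hg x (by simp))
    have := IH (fun v hv => hf v (by simp [hv])) (fun v hv => hg v (by simp [hv]))
      (fun v hv => hk v (by simp [hv])) (2 * a + f x) (2 * b + g x)
    simpa [pvPackF, hstep] using this

theorem pv_packF_zeros (bs : List Nat) (h : ∀ b ∈ bs, b = 0) : pvPackF 0 bs = 0 := by
  induction bs with
  | nil => rfl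
  | cons x t IH =>
    have hx := h x (by simp)
    simpa [pvPackF, hx] using IH (fun b hb => h b (by simp [hb]))

theorem pv_add_mod_two (x y : Nat) : (x + y) % 2 = (x % 2) ^^^ (y % 2) := by
  rcases Nat.mod_two_eq_zero_or_one x with hx | hx <;>
    rcases Nat.mod_two_eq_zero_or_one y with hy | hy <;>
    rw [Nat.add_mod, hx, hy] <;> rfl

-- parity splits into low bit xor parity of the half
theorem pv_par_split (v : Int) (hv : 0 ≤ v) :
    (v.toNat % 2) ^^^ pvParI (PySem.Int.floordiv v 2) = pvParI v := by
  unfold pvParI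
  by_cases h0 : v = 0
  · subst h0
    have : PySem.Int.floordiv 0 2 = 0 := by
      rw [PySem.Int.floordiv_eq_ediv_of_pos (by omega)]; simp
    rw [this]
    simp [PySem.Int.bitCount_zero]
  · have hpos : 0 < v := by omega
    rw [PySem.Int.bitCount_of_pos hpos]
    have hm : (PySem.Int.mod v 2).toNat = v.toNat % 2 := by
      rw [PySem.Int.mod_eq_emod_of_pos (by omega)]; omega
    rw [hm, pv_add_mod_two]
    congr 1
    omega

-- B's column string, parsed, packs the low bits of the values
theorem pv_parse_fold (vs : List Int) (a : Nat) (h : ∀ v ∈ vs, 0 ≤ v) :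
    (vs.map (fun v => if PySem.Int.band v 1 = 1 then '1' else '0')).foldl
      (fun acc c => 2 * acc + (if c = '1' then 1 else 0)) ((a : Nat) : Int)
    = ((pvPackF a (vs.map (fun v => v.toNat % 2)) : Nat) : Int) := by
  induction vs generalizing a with
  | nil => simp [pvPackF]
  | cons x t IH =>
    have hx : 0 ≤ x := h x (by simp)
    have hb : PySem.Int.band x 1 = ((x.toNat % 2 : Nat) : Int) := by
      rw [PySem.Int.band_one, PySem.Int.mod_eq_emod_of_pos (by omega)]
      omega
    have hbit : (if (if PySem.Int.band x 1 = 1 then '1' else '0') = '1' then (1 : Int) else 0)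
        = ((x.toNat % 2 : Nat) : Int) := by
      rcases Nat.mod_two_eq_zero_or_one x.toNat with hm | hm <;> simp [hb, hm]
    have h2 : 2 * ((a : Nat) : Int) + ((x.toNat % 2 : Nat) : Int)
        = (((2 * a + x.toNat % 2 : Nat)) : Int) := by push_cast; ring
    simp only [List.map_cons, List.foldl_cons, hbit, h2]
    rw [IH (2 * a + x.toNat % 2) (fun v hv => h v (by simp [hv]))]
    simp [pvPackF]

-- B's bit-plane loop computes res xor the packed parities
theorem pv_plane_eq (n : Nat) : ∀ (vs : List Int) (r : Nat),
    (vs.map Int.toNat).sum = n → (∀ v ∈ vs, 0 ≤ v) →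
    pvPlaneLoop vs ((r : Nat) : Int) = (((r ^^^ pvPackF 0 (vs.map pvParI) : Nat)) : Int) := by
  induction n using Nat.strong_induction_on with
  | _ n IH =>
    intro vs r hn hnn
    rw [pvPlaneLoop]
    by_cases h : (∃ v ∈ vs, v ≠ 0) ∧ (∀ v ∈ vs, 0 ≤ v)
    · rw [dif_pos h]
      have hcol : pvParseBin (vs.map (fun v => if PySem.Int.band v 1 = 1 then '1' else '0'))
          = ((pvPackF 0 (vs.map (fun v => v.toNat % 2)) : Nat) : Int) := by
        unfold pvParseBin
        have := pv_parse_fold vs 0 hnn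
        simpa using this
      rw [hcol, PySem.Int.bxor_natCast]
      set vs2 := pvHalve vs with hvs2
      rw [pvHalve] at hvs2
      have hnn2 : ∀ v ∈ vs2, 0 ≤ v := by
        intro v hv
        obtain ⟨w, hw, rfl⟩ := List.mem_map.1 hv
        have := hnn w hw
        rw [PySem.Int.floordiv_eq_ediv_of_pos (by omega)]
        omega
      have hlt : (vs2.map Int.toNat).sum < n := by
        rw [hvs2, List.map_map, ← hn]
        exact pvHalfSum_lt vs hnn h.1
      rw [IH _ hlt vs2 _ rfl hnn2]
      congr 1
      rw [Nat.xor_assoc]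
      congr 1
      have hmm : vs2.map pvParI = vs.map (fun v => pvParI (PySem.Int.floordiv v 2)) := by
        rw [hvs2, List.map_map]; rfl
      rw [hmm]
      have := pv_pack_xor vs (fun v => v.toNat % 2)
        (fun v => pvParI (PySem.Int.floordiv v 2)) pvParI
        (fun v _ => Nat.mod_lt _ (by omega))
        (fun v _ => Nat.mod_lt _ (by omega))
        (fun v hv => pv_par_split v (hnn v hv)) 0 0
      simpa using this
    · rw [dif_neg h]
      have hz : ∀ v ∈ vs, v = 0 := by
        intro v hv
        by_contra hne
        exact h ⟨⟨v, hv, hne⟩, hnn⟩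
      have hp0 : pvPackF 0 (vs.map pvParI) = 0 := by
        refine pv_packF_zeros _ ?_
        intro b hb
        obtain ⟨v, hv, rfl⟩ := List.mem_map.1 hb
        rw [hz v hv]
        simp [pvParI, PySem.Int.bitCount_zero]
      rw [hp0]
      simp

-- an Int Horner fold of Nat bits is the cast of the Nat pack
theorem pv_fold_cast (vs : List Int) (f : Int → Nat) (a : Nat) :
    vs.foldl (fun r v => 2 * r + ((f v : Nat) : Int)) ((a : Nat) : Int)
      = ((pvPackF a (vs.map f) : Nat) : Int) := by
  induction vs generalizing a with
  | nil => simp [pvPackF]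
  | cons x t IH =>
    have h2 : (2 * ((a : Nat) : Int) + ((f x : Nat) : Int)) = (((2 * a + f x : Nat)) : Int) := by
      push_cast; ring
    simp only [List.foldl_cons, List.map_cons, h2]
    rw [IH (2 * a + f x)]
    simp [pvPackF]

theorem pv_A_eq (addr : Int) (masks : List Int)
    (hpre : ∀ m ∈ masks, 0 ≤ PySem.Int.band addr m) :
    bank_from_bitmasks addr masks
      = ((pvPackF 0 ((masks.map (fun m => PySem.Int.band addr m)).map pvParI) : Nat) : Int) := by
  unfold bank_from_bitmasks
  have h1 : masks.foldl (fun res m => pvKernLoop (PySem.Int.band addr m) (res <<< (1 : Nat))) 0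
      = masks.foldl (fun res m => 2 * res + pvPar addr m) 0 :=
    PySem.List.foldl_congr_mem masks _ _ 0 (fun acc m hm => pv_stepA addr m acc (hpre m hm))
  rw [h1]
  have h2 : masks.foldl (fun res m => 2 * res + pvPar addr m) 0
      = (masks.map (fun m => PySem.Int.band addr m)).foldl
          (fun r v => 2 * r + ((pvParI v : Nat) : Int)) 0 := by
    rw [List.foldl_map]
    rfl
  rw [h2]
  have := pv_fold_cast (masks.map (fun m => PySem.Int.band addr m)) pvParI 0
  simpa using this

theorem pv_B_eq (addr : Int) (masks : List Int)
    (hpre : ∀ m ∈ masks, 0 ≤ PySem.Int.band addr m) :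
    bank_from_bitmasks_alt addr masks
      = ((pvPackF 0 ((masks.map (fun m => PySem.Int.band addr m)).map pvParI) : Nat) : Int) := by
  unfold bank_from_bitmasks_alt
  have hnn : ∀ v ∈ masks.map (fun m => PySem.Int.band addr m), 0 ≤ v := by
    intro v hv
    obtain ⟨m, hm, rfl⟩ := List.mem_map.1 hv
    exact hpre m hm
  have := pv_plane_eq _ (masks.map (fun m => PySem.Int.band addr m)) 0 rfl hnn
  simpa using this

-- ===== VERDICT (by name: the statement is the Claim_ definition above) =====
theorem bank_from_bitmasks_spec : Claim_equal_bank_from_bitmasks := by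
  intro addr masks _ hpre
  unfold Spec_bank_from_bitmasks
  rw [pv_A_eq addr masks hpre, pv_B_eq addr masks hpre]
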